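-- pv_equiv track=rewrite | github.com/stochi0/athena | loca_bench_rlm/vendor/loca_bench/gem/envs/woocommerce_stock_alert_s2l/preprocess/woocommerce_client.py | _extract_supplier_info
-- ===== SOURCE A (Python) =====
-- from typing import Dict, List, Optional, Tuple
--
-- def _extract_supplier_info(meta_data: List[Dict]) -> Dict:
--     """Extract supplier information from product meta_data"""
--     supplier_info = {}
--     for meta in meta_data:
--         key = meta.get('key', '')
--         value = meta.get('value', '')
--
--         if key == 'supplier_name':
--             supplier_info['name'] = value
--         elif key == 'supplier_contact':
--             supplier_info['contact'] = value
--         elif key == 'supplier_id':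
--             supplier_info['supplier_id'] = value
--
--     return supplier_info
-- ===== SOURCE B (Python) =====
-- def _extract_supplier_info(meta_data):
--     # Two-phase: index all meta entries (last occurrence wins, first-occurrence order),
--     # then query the index through a key-renaming table.
--     lookup = {m.get('key', ''): m.get('value', '') for m in meta_data}
--     mapping = {'supplier_name': 'name', 'supplier_contact': 'contact', 'supplier_id': 'supplier_id'}
--     return {mapping[k]: v for k, v in lookup.items() if k in mapping}
-- ===== Notes on version B (the rewrite author's own statement) =====
-- stated objective: alternative
-- what changed: Replaces A's single scan with an if/elif branch per meta entry by a two-phase shape: first index every meta entry into a lookup dict (last occurrence wins), then build the result by querying that index through a key-renaming table.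
import Mathlib
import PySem

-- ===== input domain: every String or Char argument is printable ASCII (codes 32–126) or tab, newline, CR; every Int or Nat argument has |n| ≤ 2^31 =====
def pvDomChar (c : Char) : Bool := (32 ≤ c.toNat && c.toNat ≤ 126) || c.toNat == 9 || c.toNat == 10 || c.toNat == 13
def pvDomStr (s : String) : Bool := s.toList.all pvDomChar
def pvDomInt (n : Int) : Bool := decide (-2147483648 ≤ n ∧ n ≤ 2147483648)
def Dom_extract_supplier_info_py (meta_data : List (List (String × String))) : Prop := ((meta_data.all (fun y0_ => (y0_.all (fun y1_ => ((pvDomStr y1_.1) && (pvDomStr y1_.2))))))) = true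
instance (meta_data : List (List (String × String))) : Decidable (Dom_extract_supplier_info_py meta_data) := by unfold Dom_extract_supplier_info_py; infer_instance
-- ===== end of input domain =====

-- B replaces A's scan-and-branch with a two-phase shape: index all meta entries into a dict, then query it through a renaming table (objective: alternative).


-- ===== PORT A =====
-- one loop; each meta contributes through an if/elif chain into the result dict
def extract_supplier_info_py (meta_data : List (List (String × String))) : List (String × String) :=
  (meta_data.foldl (fun supplier_info m =>
      let key := (PySem.Dict.mk m).getD "key" ""
      let value := (PySem.Dict.mk m).getD "value" ""
      if key = "supplier_name" then supplier_info.insert "name" value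
      else if key = "supplier_contact" then supplier_info.insert "contact" value
      else if key = "supplier_id" then supplier_info.insert "supplier_id" value
      else supplier_info)
    PySem.Dict.empty).items

-- ===== PORT B =====
def pvMapping : PySem.Dict String String :=
  PySem.Dict.mk [("supplier_name", "name"), ("supplier_contact", "contact"), ("supplier_id", "supplier_id")]

-- phase 1: lookup = {m.get('key',''): m.get('value','') for m in meta_data}
def pvLookup (meta_data : List (List (String × String))) : PySem.Dict String String :=
  meta_data.foldl (fun d m =>
      d.insert ((PySem.Dict.mk m).getD "key" "") ((PySem.Dict.mk m).getD "value" "")) PySem.Dict.empty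

-- phase 2: {mapping[k]: v for k, v in lookup.items() if k in mapping}
def pvSelect (l : List (String × String)) : PySem.Dict String String :=
  l.foldl (fun r kv =>
      if pvMapping.contains kv.1 then r.insert (pvMapping.getD kv.1 "") kv.2 else r) PySem.Dict.empty

def extract_supplier_info_py_alt (meta_data : List (List (String × String))) : List (String × String) :=
  (pvSelect (pvLookup meta_data).items).items

-- ===== PRECONDITION & SPEC =====
def Spec_extract_supplier_info_py (meta_data : List (List (String × String))) (out : List (String × String)) : Prop := out = extract_supplier_info_py_alt meta_data
instance (meta_data : List (List (String × String))) (out : List (String × String)) : Decidable (Spec_extract_supplier_info_py meta_data out) := by unfold Spec_extract_supplier_info_py; infer_instance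

-- ===== CLAIM (what is proved, stated in full; the proofs are below) =====
def Claim_equal_extract_supplier_info_py : Prop := ∀ (meta_data : List (List (String × String))), Dom_extract_supplier_info_py meta_data → Spec_extract_supplier_info_py meta_data (extract_supplier_info_py meta_data)

-- ===== LEMMAS AND PROOFS =====

-- the renaming done by A's if/elif chain, as a partial map
def pvRename (k : String) : Option String :=
  if k = "supplier_name" then some "name"
  else if k = "supplier_contact" then some "contact"
  else if k = "supplier_id" then some "supplier_id"
  else none

def pvF (p : String × String) : Option (String × String) :=
  (pvRename p.1).map (fun nk => (nk, p.2))

lemma pvRename_inj {a b : String} {x : String} (ha : pvRename a = some x) (hb : pvRename b = some x) : a = b := by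
  unfold pvRename at ha hb
  split_ifs at ha hb <;>
    first
      | rfl
      | (cases ha; first | rfl | exact absurd hb (by decide) | exact absurd hb.symm (by decide))
      | simp_all

-- B's fold step agrees with the pvRename view
lemma pvSelect_step (r : PySem.Dict String String) (kv : String × String) :
    (if pvMapping.contains kv.1 then r.insert (pvMapping.getD kv.1 "") kv.2 else r)
      = match pvRename kv.1 with
        | some nk => r.insert nk kv.2
        | none => r := by
  by_cases h1 : kv.1 = "supplier_name"
  · simp [pvMapping, pvRename, h1, PySem.Dict.contains, PySem.Dict.getD, PySem.Dict.get?]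
  · by_cases h2 : kv.1 = "supplier_contact"
    · simp [pvMapping, pvRename, h2, PySem.Dict.contains, PySem.Dict.getD, PySem.Dict.get?]
    · by_cases h3 : kv.1 = "supplier_id"
      · simp [pvMapping, pvRename, h3, PySem.Dict.contains, PySem.Dict.getD, PySem.Dict.get?]
      · simp [pvMapping, pvRename, h1, h2, h3, Ne.symm h1, Ne.symm h2, Ne.symm h3,
          PySem.Dict.contains]

-- a fold of the rename-insert step over distinct keys, all fresh for r, appends the filterMap
lemma pvSelFold_fresh (l : List (String × String)) :
    ∀ (r : PySem.Dict String String),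
      (l.map (·.1)).Nodup →
      (∀ p ∈ l, ∀ nk, pvRename p.1 = some nk → r.contains nk = false) →
      (l.foldl (fun r kv =>
          match pvRename kv.1 with
          | some nk => r.insert nk kv.2
          | none => r) r).items = r.items ++ l.filterMap pvF := by
  induction l with
  | nil => intro r _ _; simp
  | cons p rest ih =>
    intro r hnd hfresh
    obtain ⟨k, v⟩ := p
    rw [List.map_cons] at hnd
    have hnd' := List.nodup_cons.mp hnd
    cases hr : pvRename k with
    | none =>
      simp only [List.foldl_cons, hr]
      rw [ih r hnd'.2 (fun q hq nk h => hfresh q (List.mem_cons_of_mem _ hq) nk h)]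
      simp [pvF, hr]
    | some nk =>
      simp only [List.foldl_cons, hr]
      have hc : r.contains nk = false := hfresh (k, v) List.mem_cons_self nk hr
      rw [ih (r.insert nk v) hnd'.2
            (by
              intro q hq nk' h
              have hq' : r.contains nk' = false := hfresh q (List.mem_cons_of_mem _ hq) nk' h
              have hne : nk' ≠ nk := by
                intro he
                subst he
                have hqk : q.1 = k := pvRename_inj h hr
                exact hnd'.1 (List.mem_map.mpr ⟨q, hq, hqk⟩)
              simp [PySem.Dict.contains_insert, hne, hq'])]
      rw [PySem.Dict.items_insert_of_not_contains r v hc]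
      simp [pvF, hr]

-- select of a Nodup-keyed item list IS the filterMap
lemma pvSelect_items (l : List (String × String)) (hnd : (l.map (·.1)).Nodup) :
    (pvSelect l).items = l.filterMap pvF := by
  unfold pvSelect
  have hstep : (fun (r : PySem.Dict String String) (kv : String × String) =>
      if pvMapping.contains kv.1 then r.insert (pvMapping.getD kv.1 "") kv.2 else r)
      = (fun r kv =>
          match pvRename kv.1 with
          | some nk => r.insert nk kv.2
          | none => r) := by
    funext r kv
    exact pvSelect_step r kv
  rw [hstep, pvSelFold_fresh l PySem.Dict.empty hnd (by intro p _ nk _; simp)]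
  rfl

-- a renamed key occurs among the filterMapped items iff its source key is in the dict
lemma pvContains_select {L : PySem.Dict String String} {k nk : String}
    (hr : pvRename k = some nk) :
    (∃ p ∈ L.items, pvF p = some (nk, p.2)) ↔ L.contains k = true := by
  constructor
  · rintro ⟨p, hp, hf⟩
    have hsome : pvRename p.1 = some nk := by
      unfold pvF at hf
      cases h : pvRename p.1 with
      | none => simp [h] at hf
      | some x => simp [h] at hf; simpa [hf] using h
    have hpk : p.1 = k := pvRename_inj hsome hr
    have hk : k ∈ L.keys := hpk ▸ List.mem_map_of_mem hp
    exact (PySem.Dict.contains_iff_mem_keys L k).mpr hk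
  · intro hc
    have hk : k ∈ L.keys := (PySem.Dict.contains_iff_mem_keys L k).mp hc
    obtain ⟨p, hp, hpk⟩ := List.mem_map.mp hk
    exact ⟨p, hp, by simp [pvF, hpk, hr]⟩

-- central commutation: select ∘ insert = A-step ∘ select (on Nodup dicts)
lemma pvSelect_insert (L : PySem.Dict String String) (hnd : L.keys.Nodup) (k v : String) :
    pvSelect (L.insert k v).items
      = (match pvRename k with
         | some nk => (pvSelect L.items).insert nk v
         | none => pvSelect L.items) := by
  have hnd' : ((L.insert k v).items.map (·.1)).Nodup := PySem.Dict.nodup_keys_insert L k v hnd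
  have hndL : (L.items.map (·.1)).Nodup := hnd
  cases hr : pvRename k with
  | none =>
    apply PySem.Dict.ext
    rw [pvSelect_items _ hnd']
    by_cases hc : L.contains k = true
    · rw [PySem.Dict.items_insert_of_contains L v hc, List.filterMap_map, pvSelect_items _ hndL]
      apply List.filterMap_congr
      intro p _
      by_cases hpk : p.1 = k
      · simp [Function.comp, hpk, pvF, hr]
      · simp [Function.comp, hpk]
    · have hc' : L.contains k = false := by
        cases hx : L.contains k
        · rfl
        · exact absurd hx hc
      rw [PySem.Dict.items_insert_of_not_contains L v hc', List.filterMap_append,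
        pvSelect_items _ hndL]
      simp [pvF, hr]
  | some nk =>
    apply PySem.Dict.ext
    rw [pvSelect_items _ hnd']
    by_cases hc : L.contains k = true
    · -- in-place overwrite on both sides
      have hcs : (pvSelect L.items).contains nk = true := by
        obtain ⟨p, hp, hf⟩ := (pvContains_select (L := L) hr).mpr hc
        have hmem : (nk, p.2) ∈ (pvSelect L.items).items := by
          rw [pvSelect_items _ hndL]
          exact List.mem_filterMap.mpr ⟨p, hp, hf⟩
        exact (PySem.Dict.contains_iff_mem_keys _ nk).mpr
          (by simp only [PySem.Dict.keys]; exact List.mem_map.mpr ⟨_, hmem, rfl⟩)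
      rw [PySem.Dict.items_insert_of_contains L v hc,
        PySem.Dict.items_insert_of_contains _ v hcs, pvSelect_items _ hndL,
        List.filterMap_map, List.map_filterMap]
      apply List.filterMap_congr
      intro p _
      by_cases hpk : p.1 = k
      · simp [Function.comp, hpk, pvF, hr]
      · simp only [Function.comp]
        cases h : pvRename p.1 with
        | none => simp [pvF, hpk, h]
        | some nk' =>
          have hne : nk' ≠ nk := fun he => hpk (pvRename_inj (he ▸ h) hr)
          simp [pvF, hpk, h, hne]
    · have hc' : L.contains k = false := by
        cases hx : L.contains k
        · rfl
        · exact absurd hx hc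
      have hcs : (pvSelect L.items).contains nk = false := by
        cases hx : (pvSelect L.items).contains nk
        · rfl
        · exfalso
          have hk : nk ∈ (pvSelect L.items).keys := (PySem.Dict.contains_iff_mem_keys _ nk).mp hx
          have hk' : nk ∈ (L.items.filterMap pvF).map (·.1) := by
            have : (pvSelect L.items).keys = (L.items.filterMap pvF).map (·.1) := by
              simp only [PySem.Dict.keys, pvSelect_items _ hndL]
            exact this ▸ hk
          obtain ⟨q, hq, hqk⟩ := List.mem_map.mp hk'
          obtain ⟨p, hp, hf⟩ := List.mem_filterMap.mp hq
          have hf2 : pvF p = some (nk, p.2) := by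
            unfold pvF at hf ⊢
            cases h2 : pvRename p.1 with
            | none => simp [h2] at hf
            | some x =>
              simp only [h2, Option.map_some] at hf
              have hx : x = nk := by
                injection hf with hf'
                rw [← hf'] at hqk
                exact hqk
              simp [hx]
          have := (pvContains_select (L := L) hr).mp ⟨p, hp, hf2⟩
          simp [this] at hc'
      rw [PySem.Dict.items_insert_of_not_contains L v hc',
        PySem.Dict.items_insert_of_not_contains _ v hcs, List.filterMap_append,
        pvSelect_items _ hndL]
      simp [pvF, hr]

-- A's if/elif chain is the rename-insert step
lemma pvAstep_eq (d : PySem.Dict String String) (key value : String) :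
    (if key = "supplier_name" then d.insert "name" value
     else if key = "supplier_contact" then d.insert "contact" value
     else if key = "supplier_id" then d.insert "supplier_id" value
     else d)
      = match pvRename key with
        | some nk => d.insert nk value
        | none => d := by
  unfold pvRename
  split_ifs <;> rfl

lemma pvLookup_nodup (md : List (List (String × String))) : (pvLookup md).keys.Nodup := by
  unfold pvLookup
  exact PySem.Dict.nodup_keys_foldl_insert_key md (fun m => (PySem.Dict.mk m).getD "key" "")
    (fun _ m => (PySem.Dict.mk m).getD "value" "") PySem.Dict.empty (by simp)

lemma pvMain (md : List (List (String × String))) :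
    extract_supplier_info_py md = extract_supplier_info_py_alt md := by
  unfold extract_supplier_info_py extract_supplier_info_py_alt
  congr 1
  induction md using List.reverseRecOn with
  | nil => rfl
  | append_singleton md m ih =>
    rw [List.foldl_append]
    have hL : pvLookup (md ++ [m])
        = (pvLookup md).insert ((PySem.Dict.mk m).getD "key" "") ((PySem.Dict.mk m).getD "value" "") := by
      unfold pvLookup
      rw [List.foldl_append]
      rfl
    rw [hL, pvSelect_insert _ (pvLookup_nodup md) _ _]
    simp only [List.foldl_cons, List.foldl_nil]
    rw [ih, pvAstep_eq]

-- ===== VERDICT (by name: the statement is the Claim_ definition above) =====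
theorem extract_supplier_info_py_spec : Claim_equal_extract_supplier_info_py := by
  intro md _
  unfold Spec_extract_supplier_info_py
  exact pvMain md
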